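-- pv_equiv track=rewrite | github.com/smml1996/algorithm_synthesis | pomdp_gen/qmemory.py | glue_qubit_in_basis
-- ===== SOURCE A (Python) =====
-- def glue_qubit_in_basis(basis: int, address: int, qubit_basis: int) -> int:
--     bin_number: list(str) = list("{0:b}".format(basis)[::-1])
--     # append zeros
--     while len(bin_number) <= address:
--         bin_number.append('0')
--     # modify qubit in computational basis
--     bin_number[address] = str(qubit_basis)
--     # compute basis
--     result: int = 0
--     for b in bin_number[::-1]:
--         result = (result << 1) + int(b)
--     return result
-- ===== SOURCE B (Python) =====
-- def glue_qubit_in_basis(basis: int, address: int, qubit_basis: int) -> int: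
--     # closed form: keep the bits below `address`, put qubit_basis at weight
--     # 2**address, keep the bits above `address` -- no string/list round trip.
--     block = 1 << address
--     low = basis % block
--     high = basis - basis % (block * 2)
--     return low + qubit_basis * block + high
-- ===== Notes on version B (the rewrite author's own statement) =====
-- stated objective: simpler
-- what changed: B replaces A's build-a-reversed-binary-string-list, pad, set-slot and re-fold pipeline with a single closed-form arithmetic expression (low bits + qubit_basis*2**address + high bits).
-- outside the precondition, e.g. on glue_qubit_in_basis(-5, 3, 1): A returns 13, B returns -5; on glue_qubit_in_basis(5, -1, 0): A returns 1, B raises ValueError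
import Mathlib
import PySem

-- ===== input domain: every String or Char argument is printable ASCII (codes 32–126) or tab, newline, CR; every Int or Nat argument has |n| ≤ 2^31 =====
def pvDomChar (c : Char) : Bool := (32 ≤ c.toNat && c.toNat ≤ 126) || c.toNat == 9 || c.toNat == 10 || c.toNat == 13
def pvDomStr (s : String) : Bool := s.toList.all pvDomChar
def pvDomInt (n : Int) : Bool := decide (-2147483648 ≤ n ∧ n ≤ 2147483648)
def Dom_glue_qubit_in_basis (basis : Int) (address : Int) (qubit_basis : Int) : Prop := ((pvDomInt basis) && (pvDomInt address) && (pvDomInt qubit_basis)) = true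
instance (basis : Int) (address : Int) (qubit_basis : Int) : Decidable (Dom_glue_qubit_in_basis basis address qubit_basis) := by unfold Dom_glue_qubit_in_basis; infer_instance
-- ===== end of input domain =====

-- B replaces A's build-digit-list / pad / set-slot / re-fold pipeline with one
-- closed-form arithmetic expression (objective: simpler).

-- ===== PORT A =====
-- "{0:b}".format is not covered by PySem, so A's first line
-- list("{0:b}".format(basis)[::-1]) is ported by hand as the LSB-first binary digit
-- list. The Python list holds digit STRINGS ('0'/'1'/str(qubit_basis)); every element
-- is an int-valued string that is only ever read back through int(), so each element
-- is represented here by its integer value (exact on basis ≥ 0, i.e. on Pre_; for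
-- basis < 0 Python's format string carries a '-' sign on which int() raises).

-- LSB-first binary digits of n (fuel-guarded structural recursion; fuel n suffices)
def pvLsbF : Nat → Nat → List Int
  | 0, _ => []
  | f + 1, n => if n = 0 then [] else ((n % 2 : Nat) : Int) :: pvLsbF f (n / 2)

-- list("{0:b}".format(n)[::-1]) for n ≥ 0 ("0" has one digit)
def pvBinFmt (n : Nat) : List Int := if n = 0 then [0] else pvLsbF n n

-- while len(bin_number) <= address: bin_number.append('0')
-- (fuel = exact number of iterations; the guard is Python's loop condition)
def pvPadF : Nat → Int → List Int → List Int
  | 0, _, l => l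
  | f + 1, a, l => if (l.length : Int) ≤ a then pvPadF f a (l ++ [0]) else l

def pvPad (address : Int) (l : List Int) : List Int :=
  pvPadF (address + 1 - l.length).toNat address l

-- bin_number[address] = v  (Python index semantics; out of range = IndexError, outside Pre_)
def pvSetItem (l : List Int) (i : Int) (v : Int) : List Int :=
  let j := if i < 0 then i + l.length else i
  if 0 ≤ j ∧ j < l.length then l.set j.toNat v else l

def glue_qubit_in_basis (basis : Int) (address : Int) (qubit_basis : Int) : Int :=
  let bin_number : List Int := pvBinFmt basis.natAbs   -- list("{0:b}".format(basis)[::-1])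
  let bin_number := pvPad address bin_number
  let bin_number := pvSetItem bin_number address qubit_basis     -- slot holds int(str(qubit_basis))
  bin_number.reverse.foldl (fun r b => 2 * r + b) 0              -- result = (result << 1) + int(b)

-- ===== PORT B =====
def glue_qubit_in_basis_alt (basis : Int) (address : Int) (qubit_basis : Int) : Int :=
  let block : Int := 2 ^ address.toNat   -- 1 << address; Python raises for address < 0 (outside Pre_)
  let low := PySem.Int.mod basis block
  let high := basis - PySem.Int.mod basis (block * 2)
  low + qubit_basis * block + high

-- ===== PRECONDITION & SPEC =====
-- Pre_ excludes basis < 0, where A raises ValueError on int('-') except when address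
-- happens to land exactly on the sign character (an artefact of the string pipeline),
-- and address < 0, where A's value comes from negative-index wraparound while B's
-- negative shift raises ValueError.
def Pre_glue_qubit_in_basis (basis : Int) (address : Int) (qubit_basis : Int) : Prop :=
  0 ≤ basis ∧ 0 ≤ address
instance (basis : Int) (address : Int) (qubit_basis : Int) : Decidable (Pre_glue_qubit_in_basis basis address qubit_basis) := by unfold Pre_glue_qubit_in_basis; infer_instance

def pvWitness_glue_qubit_in_basis : Int × Int × Int := (5, 1, 1)

def Spec_glue_qubit_in_basis (basis : Int) (address : Int) (qubit_basis : Int) (out : Int) : Prop := out = glue_qubit_in_basis_alt basis address qubit_basis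
instance (basis : Int) (address : Int) (qubit_basis : Int) (out : Int) : Decidable (Spec_glue_qubit_in_basis basis address qubit_basis out) := by unfold Spec_glue_qubit_in_basis; infer_instance

-- ===== CLAIM (what is proved, stated in full; the proofs are below) =====
def Claim_equal_glue_qubit_in_basis : Prop := ∀ (basis : Int) (address : Int) (qubit_basis : Int), Dom_glue_qubit_in_basis basis address qubit_basis → Pre_glue_qubit_in_basis basis address qubit_basis → Spec_glue_qubit_in_basis basis address qubit_basis (glue_qubit_in_basis basis address qubit_basis)

-- ===== LEMMAS AND PROOFS =====

-- value of an LSB-first digit list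
def pvValLE : List Int → Int
  | [] => 0
  | b :: t => b + 2 * pvValLE t

theorem pv_foldl_reverse (l : List Int) (r : Int) :
    l.reverse.foldl (fun r b => 2 * r + b) r = r * 2 ^ l.length + pvValLE l := by
  induction l generalizing r with
  | nil => simp [pvValLE]
  | cons b t ih =>
    simp [List.foldl_append, ih, pvValLE, pow_succ]
    ring

theorem pvLsbF_val : ∀ (f n : Nat), n ≤ f → pvValLE (pvLsbF f n) = (n : Int) := by
  intro f
  induction f with
  | zero =>
    intro n h
    interval_cases n
    simp [pvLsbF, pvValLE]
  | succ f ih =>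
    intro n h
    by_cases h0 : n = 0
    · simp [pvLsbF, h0, pvValLE]
    · simp only [pvLsbF, h0, if_neg, not_false_iff, pvValLE]
      rw [ih (n / 2) (by omega)]
      omega

theorem pvLsbF_getD : ∀ (f a n : Nat), n ≤ f →
    (pvLsbF f n).getD a 0 = ((n / 2 ^ a % 2 : Nat) : Int) := by
  intro f
  induction f with
  | zero =>
    intro a n h
    interval_cases n
    simp [pvLsbF]
  | succ f ih =>
    intro a n h
    by_cases h0 : n = 0
    · simp [pvLsbF, h0]
    · cases a with
      | zero => simp [pvLsbF, h0]
      | succ a =>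
        simp only [pvLsbF, h0, if_neg, not_false_iff, List.getD_cons_succ]
        rw [ih a (n / 2) (by omega), Nat.div_div_eq_div_mul]
        norm_num [pow_succ, mul_comm]

theorem pvPadF_eq (a : Nat) : ∀ (k : Nat) (l : List Int), a + 1 - l.length = k →
    pvPadF k (a : Int) l = l ++ List.replicate k 0 := by
  intro k
  induction k with
  | zero =>
    intro l _
    simp [pvPadF]
  | succ k ih =>
    intro l hk
    have hle : ((l.length : Int) ≤ (a : Int)) := by omega
    rw [pvPadF, if_pos hle, ih (l ++ [0]) (by simp; omega)]
    simp [List.append_assoc, List.replicate_succ]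

theorem pvPad_eq (a : Nat) (l : List Int) :
    pvPad (a : Int) l = l ++ List.replicate (a + 1 - l.length) 0 := by
  unfold pvPad
  have h : ((a : Int) + 1 - l.length).toNat = a + 1 - l.length := by omega
  rw [h, pvPadF_eq a (a + 1 - l.length) l rfl]

theorem pvValLE_append_replicate (l : List Int) (k : Nat) :
    pvValLE (l ++ List.replicate k 0) = pvValLE l := by
  induction l with
  | nil =>
    simp only [List.nil_append]
    induction k with
    | zero => simp [pvValLE]
    | succ k ih => simp [List.replicate_succ, pvValLE, ih]
  | cons b t ih => simp [pvValLE, ih]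

theorem pvGetD_append_replicate (l : List Int) (k i : Nat) :
    (l ++ List.replicate k (0 : Int)).getD i 0 = l.getD i 0 := by
  induction l generalizing i with
  | nil => simp
  | cons b t ih =>
    cases i with
    | zero => simp
    | succ i =>
      simp only [List.cons_append, List.getD_cons_succ]
      exact ih i

theorem pvValLE_set (l : List Int) (a : Nat) (v : Int) (h : a < l.length) :
    pvValLE (l.set a v) = pvValLE l + (v - l.getD a 0) * 2 ^ a := by
  induction l generalizing a with
  | nil => simp at h
  | cons b t ih =>
    cases a with
    | zero => simp [pvValLE]; ring
    | succ a =>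
      simp only [List.set, pvValLE, List.getD_cons_succ]
      rw [ih a (by simpa using h)]
      ring

theorem pvBinDigits_val (n : Nat) : pvValLE (pvBinFmt n) = (n : Int) := by
  unfold pvBinFmt
  by_cases h : n = 0
  · simp [h, pvValLE]
  · simp only [h, if_neg, not_false_iff]
    exact pvLsbF_val n n le_rfl

theorem pvBinDigits_getD (n a : Nat) :
    (pvBinFmt n).getD a 0 = ((n / 2 ^ a % 2 : Nat) : Int) := by
  unfold pvBinFmt
  by_cases h : n = 0
  · subst h
    cases a <;> simp
  · simp only [h, if_neg, not_false_iff]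
    exact pvLsbF_getD n a n le_rfl

-- ===== VERDICT (by name: the statement is the Claim_ definition above) =====
theorem glue_qubit_in_basis_spec : Claim_equal_glue_qubit_in_basis := by
  intro basis address qubit_basis _hdom hpre
  obtain ⟨hb, ha⟩ := hpre
  unfold Spec_glue_qubit_in_basis glue_qubit_in_basis glue_qubit_in_basis_alt
  dsimp only
  obtain ⟨n, rfl⟩ : ∃ n : Nat, basis = (n : Int) := ⟨basis.toNat, by omega⟩
  obtain ⟨a, rfl⟩ : ∃ a : Nat, address = (a : Int) := ⟨address.toNat, by omega⟩
  have hnat : (n : Int).natAbs = n := by omega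
  have htn : ((a : Int)).toNat = a := by omega
  set D : List Int := pvBinFmt n with hD
  rw [hnat, pvPad_eq a D]
  set k : Nat := a + 1 - D.length with hk
  have hlen : (D ++ List.replicate k 0).length = D.length + k := by simp
  have halt : a < (D ++ List.replicate k 0).length := by rw [hlen]; omega
  -- the set step takes the in-range branch with index a
  have hset : pvSetItem (D ++ List.replicate k 0) (a : Int) qubit_basis
      = (D ++ List.replicate k 0).set a qubit_basis := by
    unfold pvSetItem
    have h1 : ¬ ((a : Int) < 0) := by omega
    simp only [h1, if_neg, not_false_iff]
    rw [if_pos]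
    · rw [htn]
    · constructor
      · omega
      · exact_mod_cast halt
  rw [hset, pv_foldl_reverse, pvValLE_set _ _ _ halt, pvGetD_append_replicate,
      pvValLE_append_replicate, hD, pvBinDigits_val, pvBinDigits_getD, htn]
  have hpos : (0 : Int) < 2 ^ a := by positivity
  rw [PySem.Int.mod_eq_emod_of_pos hpos, PySem.Int.mod_eq_emod_of_pos (show (0:Int) < 2 ^ a * 2 by positivity)]
  have e1 : ((n : Int)) % (2 ^ a) = ((n % 2 ^ a : Nat) : Int) := by push_cast; ring_nf
  have e2 : ((n : Int)) % (2 ^ a * 2) = ((n % (2 ^ a * 2) : Nat) : Int) := by push_cast; ring_nf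
  rw [e1, e2]
  have hmm : n % (2 ^ a * 2) = n % 2 ^ a + 2 ^ a * (n / 2 ^ a % 2) := Nat.mod_mul
  rw [hmm]
  push_cast
  ring
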